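-- pv_equiv track=rewrite | github.com/dsc-courses/dsc40b-su24-practice | problems/120/code.py | foo
-- ===== SOURCE A (Python) =====
-- def foo(numbers):
--     """Assume that `numbers` is a list containing n numbers."""
--     # counts is a Python dictionary, which is implemented using hash table
--     counts = {}
--     for x in numbers:
--         for y in numbers:
--             diff = abs(x - y)
--             if diff not in counts:
--                 counts[diff] = 1
--             else:
--                 counts[diff] = counts[diff] + 1
--     return counts
-- ===== SOURCE B (Python) =====
-- def foo(numbers):
--     """Assume that `numbers` is a list containing n numbers."""
--     # Each unordered pair {x, y}, x != y, contributes 2 to counts[|x-y|]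
--     # (once as (x, y) and once as (y, x)); the n self-pairs contribute n to counts[0].
--     counts = {0: len(numbers)} if numbers else {}
--     rest = numbers
--     while rest:
--         x, rest = rest[0], rest[1:]
--         for y in rest:
--             d = abs(x - y)
--             counts[d] = counts.get(d, 0) + 2
--     return counts
-- ===== Notes on version B (the rewrite author's own statement) =====
-- stated objective: faster
-- what changed: Iterates only over unordered pairs x<y, each adding 2 to its difference count, and seeds the zero-difference count with the list length for the self-pairs, instead of scanning all n^2 ordered pairs.
import Mathlib
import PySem

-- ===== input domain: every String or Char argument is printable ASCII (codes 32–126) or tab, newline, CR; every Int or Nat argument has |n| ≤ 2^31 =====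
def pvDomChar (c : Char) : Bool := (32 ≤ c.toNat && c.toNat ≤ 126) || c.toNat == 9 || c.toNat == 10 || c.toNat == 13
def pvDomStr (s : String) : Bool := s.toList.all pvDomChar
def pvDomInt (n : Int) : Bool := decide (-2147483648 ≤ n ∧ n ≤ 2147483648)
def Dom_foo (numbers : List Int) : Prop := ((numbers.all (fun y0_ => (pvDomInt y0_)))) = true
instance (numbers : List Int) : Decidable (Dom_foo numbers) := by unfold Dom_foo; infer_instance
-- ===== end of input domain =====

-- B loops over unordered pairs only, adding 2 per pair, and seeds the zero-difference count
-- with the list length for the self-pairs: half the dict updates of A's all-ordered-pairs scan.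

-- ===== PORT A =====
-- for x in numbers: for y in numbers: diff = abs(x-y); counts[diff] = 1 if absent else counts[diff]+1
-- (in the else-branch diff is a present key, so Python's counts[diff] is getD diff 0 there)
def foo (numbers : List Int) : List (Int × Int) :=
  (numbers.foldl (fun counts x =>
      numbers.foldl (fun counts y =>
        let diff := |x - y|
        if counts.contains diff = false then counts.insert diff 1
        else counts.insert diff (counts.getD diff 0 + 1)) counts)
    PySem.Dict.empty).items

-- ===== PORT B =====
-- while rest: x, rest = rest[0], rest[1:]; for y in rest: counts[d] = counts.get(d, 0) + 2
def fooAltGo (counts : PySem.Dict Int Int) : List Int → PySem.Dict Int Int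
  | [] => counts
  | x :: rest =>
      fooAltGo (rest.foldl (fun c y => c.insert (|x - y|) (c.getD (|x - y|) 0 + 2)) counts) rest

-- counts = {0: len(numbers)} if numbers else {}
def foo_alt (numbers : List Int) : List (Int × Int) :=
  (fooAltGo
    (if numbers.isEmpty then PySem.Dict.empty else PySem.Dict.empty.insert 0 (numbers.length : Int))
    numbers).items

-- ===== PRECONDITION & SPEC =====
def Spec_foo (numbers : List Int) (out : List (Int × Int)) : Prop := out = foo_alt numbers
instance (numbers : List Int) (out : List (Int × Int)) : Decidable (Spec_foo numbers out) := by unfold Spec_foo; infer_instance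

-- ===== CLAIM (what is proved, stated in full; the proofs are below) =====
def Claim_equal_foo : Prop := ∀ (numbers : List Int), Dom_foo numbers → Spec_foo numbers (foo numbers)

-- ===== LEMMAS AND PROOFS =====

def rowD (x : Int) (ys : List Int) : List Int := ys.map (fun y => |x - y|)
def allD (xs : List Int) : List Int := xs.flatMap (fun x => rowD x xs)
def upD : List Int → List Int
  | [] => []
  | x :: r => rowD x r ++ upD r

lemma cfci (l : List Int) (h : Int → Int) (g : Int → List Int) (k : Int) :
    (l.flatMap (fun a => h a :: g a)).count k
      = (l.map h).count k + (l.flatMap g).count k := by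
  induction l with
  | nil => simp
  | cons a t ih => simp [List.count_append, List.count_cons, ih]; omega

lemma update_of_subset (l : List Int) : ∀ (s : PySem.Set Int), (∀ e ∈ l, e ∈ s) →
    PySem.Set.update s l = s := by
  induction l with
  | nil => intro s _; simp [PySem.Set.update_nil]
  | cons a t ih =>
      intro s h
      rw [PySem.Set.update_cons, PySem.Set.add_of_mem (h a (by simp))]
      exact ih s (fun e he => h e (by simp [he]))

lemma getD_foldl_ins2 (l : List Int) : ∀ (c : PySem.Dict Int Int) (k : Int),
    (l.foldl (fun c d => c.insert d (c.getD d 0 + 2)) c).getD k 0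
      = c.getD k 0 + 2 * (l.count k : Int) := by
  induction l with
  | nil => simp
  | cons d t ih =>
      intro c k
      rw [List.foldl_cons, ih, PySem.Dict.getD_insert, List.count_cons]
      by_cases hk : k = d <;> simp [hk] <;> omega

lemma fooAltGo_eq (xs : List Int) : ∀ (c : PySem.Dict Int Int),
    fooAltGo c xs = (upD xs).foldl (fun c d => c.insert d (c.getD d 0 + 2)) c := by
  induction xs with
  | nil => intro c; rfl
  | cons x r ih =>
      intro c
      rw [fooAltGo, ih, upD, List.foldl_append, rowD, List.foldl_map]

lemma countV (xs : List Int) (k : Int) :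
    (allD xs).count k = (if k = 0 then xs.length else 0) + 2 * (upD xs).count k := by
  induction xs with
  | nil => simp [allD, upD]
  | cons x r ih =>
      have hrow : ∀ a ∈ r, (fun a => |a - x|) a = (fun y => |x - y|) a := by
        intro a _; simp [abs_sub_comm]
      have h1 : allD (x :: r)
          = (0 :: rowD x r) ++ r.flatMap (fun a => |a - x| :: rowD a r) := by
        simp [allD, rowD, List.flatMap_cons, abs_sub_comm]
      rw [h1, List.count_append, cfci r (fun a => |a - x|) (fun a => rowD a r) k,
        List.map_congr_left hrow]
      have h2 : r.flatMap (fun a => rowD a r) = allD r := rfl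
      rw [h2, ih, upD, List.count_append, List.count_cons]
      have h3 : r.map (fun y => |x - y|) = rowD x r := rfl
      rw [h3]
      by_cases hk : k = 0
      · simp [hk]; omega
      · simp [hk, Ne.symm hk]; omega

lemma K3 (l : List Int) : ∀ (done : List Int) (s : PySem.Set Int), (0:Int) ∈ s →
    (∀ a ∈ l, ∀ b ∈ done, |a - b| ∈ s) →
    PySem.Set.update s (l.flatMap (fun a => rowD a (done ++ l)))
      = PySem.Set.update s (upD l) := by
  induction l with
  | nil => intro done s _ _; simp [upD]
  | cons a l' ih =>
      intro done s h0 hd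
      have hrowdone : PySem.Set.update s (rowD a done) = s :=
        update_of_subset _ s (by
          intro e he
          rcases List.mem_map.mp he with ⟨b, hb, rfl⟩
          exact hd a (by simp) b hb)
      have hsplit : rowD a (done ++ a :: l') = rowD a done ++ (0 :: rowD a l') := by
        simp [rowD]
      have hflat : (a :: l').flatMap (fun a' => rowD a' (done ++ a :: l'))
          = (rowD a done ++ (0 :: rowD a l'))
            ++ l'.flatMap (fun a' => rowD a' ((done ++ [a]) ++ l')) := by
        rw [List.flatMap_cons, hsplit]
        simp
      rw [hflat, PySem.Set.update_append, PySem.Set.update_append, hrowdone,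
        PySem.Set.update_cons, PySem.Set.add_of_mem h0]
      set s' := PySem.Set.update s (rowD a l') with hs'
      have h0' : (0:Int) ∈ s' := (PySem.Set.mem_update _ _ _).mpr (Or.inl h0)
      have hd' : ∀ a' ∈ l', ∀ b ∈ done ++ [a], |a' - b| ∈ s' := by
        intro a' ha' b hb
        rcases List.mem_append.mp hb with hb | hb
        · exact (PySem.Set.mem_update _ _ _).mpr (Or.inl (hd a' (by simp [ha']) b hb))
        · have : b = a := by simpa using hb
          subst this
          refine (PySem.Set.mem_update _ _ _).mpr (Or.inr ?_)
          rw [abs_sub_comm]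
          exact List.mem_map.mpr ⟨a', ha', rfl⟩
      rw [ih (done ++ [a]) s' h0' hd']
      rw [upD, PySem.Set.update_append]

lemma keysEq (x : Int) (r : List Int) :
    PySem.Set.ofList (allD (x :: r)) = PySem.Set.update [0] (upD (x :: r)) := by
  have h1 : allD (x :: r)
      = (0 :: rowD x r) ++ r.flatMap (fun a => rowD a ([x] ++ r)) := by
    simp [allD, rowD, List.flatMap_cons]
  rw [← PySem.Set.update_nil_left, h1, PySem.Set.update_append, PySem.Set.update_cons]
  have hadd : PySem.Set.add ([] : PySem.Set Int) 0 = [0] := rfl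
  rw [hadd]
  set s' := PySem.Set.update [0] (rowD x r) with hs'
  have h0' : (0:Int) ∈ s' := (PySem.Set.mem_update _ _ _).mpr (Or.inl (by simp))
  have hd' : ∀ a ∈ r, ∀ b ∈ [x], |a - b| ∈ s' := by
    intro a ha b hb
    have : b = x := by simpa using hb
    subst this
    refine (PySem.Set.mem_update _ _ _).mpr (Or.inr ?_)
    rw [abs_sub_comm]
    exact List.mem_map.mpr ⟨a, ha, rfl⟩
  rw [K3 r [x] s' h0' hd', upD, PySem.Set.update_append]

lemma foldl_rows (xs ys : List Int) : ∀ c : PySem.Dict Int Int,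
    xs.foldl (fun c x => ys.foldl (fun c y => c.insert (|x - y|) (c.getD (|x - y|) 0 + 1)) c) c
      = (xs.flatMap (fun x => rowD x ys)).foldl (fun c d => c.insert d (c.getD d 0 + 1)) c := by
  induction xs with
  | nil => intro c; rfl
  | cons x t ih =>
      intro c
      rw [List.foldl_cons, ih, List.flatMap_cons, List.foldl_append, rowD, List.foldl_map]

lemma bodyA (c : PySem.Dict Int Int) (x y : Int) :
    (let diff := |x - y|
     if c.contains diff = false then c.insert diff 1
     else c.insert diff (c.getD diff 0 + 1))
    = c.insert (|x - y|) (c.getD (|x - y|) 0 + 1) := by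
  by_cases h : c.contains (|x - y|) = true
  · simp [h]
  · have hf : c.contains (|x - y|) = false := by simpa using h
    rw [PySem.Dict.getD_of_not_contains c 0 hf]; simp [hf]

lemma fooA_eq (numbers : List Int) :
    foo numbers = (PySem.Dict.counter (allD numbers)).items := by
  unfold foo
  have hb : ∀ x : Int, (fun (counts : PySem.Dict Int Int) (y : Int) =>
      let diff := |x - y|
      if counts.contains diff = false then counts.insert diff 1
      else counts.insert diff (counts.getD diff 0 + 1))
    = fun counts y => counts.insert (|x - y|) (counts.getD (|x - y|) 0 + 1) :=
    fun x => funext fun c => funext fun y => bodyA c x y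
  simp only [hb]
  rw [foldl_rows, PySem.Dict.foldl_insert_getD_add_one_eq_counter]
  rfl

lemma foo_eq_alt (numbers : List Int) : foo numbers = foo_alt numbers := by
  cases numbers with
  | nil => rfl
  | cons x r =>
    rw [fooA_eq, PySem.Dict.items_counter]
    unfold foo_alt
    simp only [List.isEmpty_cons, Bool.false_eq_true, if_false]
    rw [fooAltGo_eq]
    have hbk : (PySem.Dict.empty.insert (0:Int) (((x::r).length : Int))).keys = [0] := rfl
    have hkeys := PySem.Dict.keys_foldl_insert (upD (x::r))
      (fun (c : PySem.Dict Int Int) d => c.getD d 0 + 2)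
      (PySem.Dict.empty.insert (0:Int) (((x::r).length : Int)))
    have hnodup := PySem.Dict.nodup_keys_foldl_insert (upD (x::r))
      (fun (c : PySem.Dict Int Int) d => c.getD d 0 + 2)
      (PySem.Dict.empty.insert (0:Int) (((x::r).length : Int)))
      (by rw [hbk]; simp)
    rw [PySem.Dict.items_eq_map_keys _ hnodup 0, hkeys, hbk, ← keysEq]
    apply List.map_congr_left
    intro k hk
    have hv := getD_foldl_ins2 (upD (x::r))
      (PySem.Dict.empty.insert (0:Int) (((x::r).length : Int))) k
    have hbase : (PySem.Dict.empty.insert (0:Int) (((x::r).length : Int))).getD k 0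
        = if k = 0 then (((x::r).length : Int)) else 0 := by
      rw [PySem.Dict.getD_insert]; simp [PySem.Dict.getD_empty]
    have hc := countV (x::r) k
    refine Prod.ext rfl ?_
    simp only [hv, hbase]
    rw [hc]
    push_cast
    by_cases hk0 : k = 0 <;> simp [hk0]

-- ===== VERDICT (by name: the statement is the Claim_ definition above) =====
theorem foo_spec : Claim_equal_foo := by
  intro numbers _
  exact foo_eq_alt numbers
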